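-- pv_equiv track=rewrite | github.com/devmindtan/DataStructures-Algorithms | GeeksForGeeks/Pratice Problems/Basic/Binary String.py | binarySubstring_c4
-- ===== SOURCE A (Python) =====
-- def binarySubstring_c4(s):
--     count = 0
--     res = 0
--     for ch in s:
--         if (ch == "1"):
--             res += count
--             count += 1
--     return res
--
-- s = "1111"
-- ===== SOURCE B (Python) =====
-- def binarySubstring_c4(s):
--     k = sum(1 for ch in s if ch == "1")
--     return k * (k - 1) // 2
-- ===== Notes on version B (the rewrite author's own statement) =====
-- stated objective: simpler
-- what changed: Replaces A's running-partial-sum accumulation (res += count inside the scan) with counting the '1' characters once and returning the closed-form k*(k-1)//2.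
import Mathlib
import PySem

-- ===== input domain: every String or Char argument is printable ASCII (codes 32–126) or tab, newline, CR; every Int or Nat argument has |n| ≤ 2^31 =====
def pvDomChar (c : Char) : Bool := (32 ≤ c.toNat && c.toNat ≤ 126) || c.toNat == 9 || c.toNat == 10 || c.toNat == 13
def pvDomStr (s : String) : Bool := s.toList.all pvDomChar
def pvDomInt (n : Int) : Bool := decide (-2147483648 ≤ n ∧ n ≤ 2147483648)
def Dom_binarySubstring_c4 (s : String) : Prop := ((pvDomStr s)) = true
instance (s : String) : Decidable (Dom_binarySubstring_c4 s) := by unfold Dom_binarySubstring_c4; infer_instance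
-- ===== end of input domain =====

-- B counts the '1' characters once and returns the closed form k*(k-1)//2 instead of A's running-partial-sum accumulation (objective: simpler).


-- ===== PORT A =====
def binarySubstring_c4 (s : String) : Int :=
  (s.toList.foldl
    (fun (st : Int × Int) ch => if ch == '1' then (st.1 + 1, st.2 + st.1) else st)
    (0, 0)).2

-- ===== PORT B =====
def binarySubstring_c4_alt (s : String) : Int :=
  let k : Int := s.toList.foldl (fun n ch => if ch == '1' then n + 1 else n) 0
  PySem.Int.floordiv (k * (k - 1)) 2

-- ===== PRECONDITION & SPEC =====
def Spec_binarySubstring_c4 (s : String) (out : Int) : Prop := out = binarySubstring_c4_alt s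
instance (s : String) (out : Int) : Decidable (Spec_binarySubstring_c4 s out) := by unfold Spec_binarySubstring_c4; infer_instance

-- ===== CLAIM (what is proved, stated in full; the proofs are below) =====
def Claim_equal_binarySubstring_c4 : Prop := ∀ (s : String), Dom_binarySubstring_c4 s → Spec_binarySubstring_c4 s (binarySubstring_c4 s)

-- ===== LEMMAS AND PROOFS =====

-- ===== VERDICT (by name: the statement is the Claim_ definition above) =====
lemma loopA_spec (l : List Char) (c r : Int) :
    (l.foldl (fun (st : Int × Int) ch => if ch == '1' then (st.1 + 1, st.2 + st.1) else st) (c, r)).1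
      = c + (l.count '1' : Int)
    ∧ 2 * (l.foldl (fun (st : Int × Int) ch => if ch == '1' then (st.1 + 1, st.2 + st.1) else st) (c, r)).2
      = 2 * r + 2 * c * (l.count '1' : Int) + (l.count '1' : Int) * ((l.count '1' : Int) - 1) := by
  induction l generalizing c r with
  | nil => simp
  | cons ch t ih =>
    by_cases h : ch = '1'
    · subst h
      have h1 := ih (c + 1) (r + c)
      simp only [List.foldl_cons, beq_self_eq_true, if_true, List.count_cons_self] at h1 ⊢
      refine ⟨?_, ?_⟩
      · rw [h1.1]; push_cast; ring
      · rw [h1.2]; push_cast; ring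
    · simp only [List.foldl_cons, if_neg (show ¬ ((ch == '1') = true) by simpa using h)]
      simpa [List.count_cons, h] using ih c r

theorem binarySubstring_c4_spec : Claim_equal_binarySubstring_c4 := by
  intro s _
  unfold Spec_binarySubstring_c4 binarySubstring_c4 binarySubstring_c4_alt
  have h := loopA_spec s.toList 0 0
  rw [PySem.List.foldl_beq_add_one]
  set k : Int := (s.toList.count '1' : Int) with hk
  have h2 : 2 * (s.toList.foldl
      (fun (st : Int × Int) ch => if ch == '1' then (st.1 + 1, st.2 + st.1) else st) (0, 0)).2
      = k * (k - 1) := by rw [h.2]; ring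
  rw [PySem.Int.floordiv_eq_ediv_of_pos (by norm_num)]
  have h3 : (0 + k) * (0 + k - 1) = k * (k - 1) := by ring
  rw [h3]
  omega
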